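-- pv_equiv track=rewrite | github.com/dpalmqvist/storebot | .github/scripts/openai_review.py | truncate_diff
-- ===== SOURCE A (Python) =====
-- TRUNCATE_BYTES = 100_000
--
-- def truncate_diff(diff: str) -> str:
--     if len(diff) <= TRUNCATE_BYTES:
--         return diff
--     truncated: list[str] = []
--     size = 0
--     for line in diff.splitlines(keepends=True):
--         if size + len(line) > TRUNCATE_BYTES and line.startswith("diff --git"):
--             break
--         truncated.append(line)
--         size += len(line)
--     return "".join(truncated) + "\n\n[... diff truncated for token limit ...]\n"
-- ===== SOURCE B (Python) =====
-- TRUNCATE_BYTES = 100_000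
--
-- def truncate_diff(diff: str) -> str:
--     if len(diff) <= TRUNCATE_BYTES:
--         return diff
--     # Group the lines into a leading chunk plus one section per 'diff --git' header.
--     sections = []
--     current = []
--     for line in diff.splitlines(keepends=True):
--         if line.startswith("diff --git"):
--             sections.append(current)
--             current = [line]
--         else:
--             current.append(line)
--     sections.append(current)
--     lead, file_sections = sections[0], sections[1:]
--     out = lead[:]
--     total = sum(len(l) for l in lead)
--     for sec in file_sections:
--         if total + len(sec[0]) > TRUNCATE_BYTES:
--             break
--         out.extend(sec)
--         total += sum(len(l) for l in sec)
--     return "".join(out) + "\n\n[... diff truncated for token limit ...]\n"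
-- ===== Notes on version B (the rewrite author's own statement) =====
-- stated objective: alternative
-- what changed: B splits the diff's lines into a leading chunk plus whole header-started file sections in one grouping pass and then keeps sections until the next section header would cross the byte limit, instead of A's single per-line loop that tests the limit-and-header condition on every line.
import Mathlib
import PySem

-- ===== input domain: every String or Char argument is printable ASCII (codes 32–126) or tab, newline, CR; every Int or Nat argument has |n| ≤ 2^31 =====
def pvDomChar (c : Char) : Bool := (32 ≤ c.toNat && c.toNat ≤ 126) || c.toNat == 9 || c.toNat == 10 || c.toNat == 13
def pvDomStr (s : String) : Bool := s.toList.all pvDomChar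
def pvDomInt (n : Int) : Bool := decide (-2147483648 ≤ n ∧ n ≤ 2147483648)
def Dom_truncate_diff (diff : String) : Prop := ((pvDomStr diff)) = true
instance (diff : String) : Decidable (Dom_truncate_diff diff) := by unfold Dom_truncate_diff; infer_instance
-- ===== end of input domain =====

-- B replaces A's per-line scan by a group-into-sections pass followed by a per-section loop
-- (objective: alternative decomposition, same cost).

-- shared helper: hand port of str.splitlines(keepends=True), exact on '\n' / '\r' / '\r\n'
-- (the only line terminators admitted by Dom_truncate_diff); both Pythons call it.
def splitKEAux : List Char → List Char → List (List Char)
  | [], acc => if acc.isEmpty then [] else [acc.reverse]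
  | '\r' :: '\n' :: rest, acc => (acc.reverse ++ ['\r', '\n']) :: splitKEAux rest []
  | '\r' :: rest, acc => (acc.reverse ++ ['\r']) :: splitKEAux rest []
  | '\n' :: rest, acc => (acc.reverse ++ ['\n']) :: splitKEAux rest []
  | c :: rest, acc => splitKEAux rest (c :: acc)

def pvHdr : List Char := "diff --git".toList

-- ===== PORT A =====
-- A's for-loop over the lines, with the running byte count and the break.
def aLoop : List (List Char) → Nat → List (List Char)
  | [], _ => []
  | l :: rest, size =>
    if size + l.length > 100000 && PySem.Chars.startswith l pvHdr then []
    else l :: aLoop rest (size + l.length)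

def truncate_diff (diff : String) : String :=
  if PySem.Str.len diff ≤ 100000 then diff
  else
    String.mk ((aLoop (splitKEAux diff.toList []) 0).flatten)
      ++ "\n\n[... diff truncated for token limit ...]\n"

-- ===== PORT B =====
-- Source B's grouping pass: accumulate `current`, start a new group at each header line.
def bGroup : List (List Char) → List (List Char) → List (List (List Char))
  | [], current => [current]
  | l :: rest, current =>
    if PySem.Chars.startswith l pvHdr then current :: bGroup rest [l]
    else bGroup rest (current ++ [l])

def lensum (ls : List (List Char)) : Nat := (ls.map List.length).sum

-- Source B's per-section loop: break before a section whose header would cross the limit.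
def bLoop : List (List (List Char)) → Nat → List (List Char)
  | [], _ => []
  | [] :: _, _ => []  -- unreachable: every file section starts with its header line
  | (h :: tl) :: rest, total =>
    if total + h.length > 100000 then []
    else (h :: tl) ++ bLoop rest (total + lensum (h :: tl))

def truncate_diff_alt (diff : String) : String :=
  if PySem.Str.len diff ≤ 100000 then diff
  else
    match bGroup (splitKEAux diff.toList []) [] with
    | [] => ""  -- unreachable: bGroup always returns at least one group
    | lead :: secs =>
      String.mk ((lead ++ bLoop secs (lensum lead)).flatten)
        ++ "\n\n[... diff truncated for token limit ...]\n"

-- ===== PRECONDITION & SPEC =====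
def Spec_truncate_diff (diff : String) (out : String) : Prop := out = truncate_diff_alt diff
instance (diff : String) (out : String) : Decidable (Spec_truncate_diff diff out) := by unfold Spec_truncate_diff; infer_instance

-- ===== CLAIM (what is proved, stated in full; the proofs are below) =====
def Claim_equal_truncate_diff : Prop := ∀ (diff : String), Dom_truncate_diff diff → Spec_truncate_diff diff (truncate_diff diff)

-- ===== LEMMAS AND PROOFS =====

theorem lensum_append (a b : List (List Char)) : lensum (a ++ b) = lensum a + lensum b := by
  simp [lensum]

-- every group produced by bGroup extends its seed `cur`
theorem bGroup_head (lines : List (List Char)) : ∀ (cur : List (List Char)),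
    ∃ p secs, bGroup lines cur = (cur ++ p) :: secs := by
  induction lines with
  | nil => intro cur; exact ⟨[], [], by simp [bGroup]⟩
  | cons l rest ih =>
    intro cur
    by_cases h : PySem.Chars.startswith l pvHdr = true
    · exact ⟨[], bGroup rest [l], by simp [bGroup, h]⟩
    · obtain ⟨p, secs, hp⟩ := ih (cur ++ [l])
      exact ⟨[l] ++ p, secs, by simp [bGroup, h, hp]⟩

-- main invariant: the section loop over the groups equals A's line loop
theorem loop_eq (lines : List (List Char)) : ∀ (cur lead : List (List Char))
    (secs : List (List (List Char))) (t : Nat),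
    bGroup lines cur = lead :: secs →
    lead ++ bLoop secs (t + lensum lead) = cur ++ aLoop lines (t + lensum cur) := by
  induction lines with
  | nil =>
    intro cur lead secs t h
    simp only [bGroup] at h
    injection h with h1 h2
    subst h1; subst h2
    simp [bLoop, aLoop]
  | cons l rest ih =>
    intro cur lead secs t h
    by_cases hh : PySem.Chars.startswith l pvHdr = true
    · simp only [bGroup, hh, if_pos] at h
      injection h with h1 h2
      subst h1; subst h2
      obtain ⟨p, secs', hp⟩ := bGroup_head rest [l]
      rw [hp]
      simp only [List.singleton_append] at hp ⊢
      by_cases hlim : t + lensum cur + l.length > 100000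
      · simp [bLoop, aLoop, hh, hlim]
      · have ihinst := ih [l] (l :: p) secs' (t + lensum cur) hp
        simp only [bLoop, aLoop, hh, Bool.and_true, decide_eq_true_eq]
        rw [if_neg hlim, if_neg (by simpa using hlim)]
        rw [show lensum [l] = l.length from by simp [lensum]] at ihinst
        simp only [List.singleton_append, List.cons_append] at ihinst
        simpa only [List.nil_append, List.cons_append, List.append_assoc] using
          congrArg (cur ++ ·) ihinst
    · simp only [bGroup, hh, Bool.false_eq_true, if_false] at h
      have ihinst := ih (cur ++ [l]) lead secs t h
      simp only [aLoop, hh, Bool.and_false, Bool.false_eq_true, if_false]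
      rw [ihinst, lensum_append]
      simp [lensum, List.append_assoc, Nat.add_assoc]

-- ===== VERDICT (by name: the statement is the Claim_ definition above) =====
theorem truncate_diff_spec : Claim_equal_truncate_diff := by
  intro diff _
  unfold Spec_truncate_diff truncate_diff truncate_diff_alt
  simp only [PySem.Str.len] at *
  by_cases hlen : diff.length ≤ 100000
  · have h' : (diff.toList.length : Int) ≤ 100000 := by simpa using hlen
    simp [hlen, h']
  · have h' : ¬ (diff.toList.length : Int) ≤ 100000 := by simpa using hlen
    rw [if_neg h']
    obtain ⟨p, secs, hp⟩ := bGroup_head (splitKEAux diff.toList []) []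
    simp only [List.nil_append] at hp
    rw [hp]
    have h0 : lensum ([] : List (List Char)) = 0 := by simp [lensum]
    have key := loop_eq (splitKEAux diff.toList []) [] p secs 0 hp
    rw [h0, Nat.zero_add, Nat.zero_add, List.nil_append] at key
    rw [← key]
    simp [List.flatten_append]
    exact fun hc => absurd hc hlen
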